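-- pv_equiv track=rewrite | github.com/Pikotyan484/very-test | autopedia/utils.py | markdown_excerpt
-- ===== SOURCE A (Python) =====
-- def markdown_excerpt(text: str, max_lines: int = 140, max_chars: int = 12000) -> str:
--     selected: list[str] = []
--     current_size = 0
--     for raw_line in text.splitlines():
--         line = raw_line.rstrip()
--         if not line and selected and not selected[-1]:
--             continue
--         piece = line + "\n"
--         if selected and (len(selected) >= max_lines or current_size + len(piece) > max_chars):
--             break
--         selected.append(line)
--         current_size += len(piece)
--     return "\n".join(selected).strip()
-- ===== SOURCE B (Python) =====
-- def markdown_excerpt(text: str, max_lines: int = 140, max_chars: int = 12000) -> str: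
--     lines = [raw.rstrip() for raw in text.splitlines()]
--     cleaned = [line for prev, line in zip([None] + lines, lines) if line or prev != ""]
--     total = 0
--     by_chars = len(cleaned)
--     for i, line in enumerate(cleaned):
--         total += len(line) + 1
--         if total > max_chars:
--             by_chars = i
--             break
--     keep = min(len(cleaned), max(1, min(max_lines, by_chars)))
--     return "\n".join(cleaned[:keep]).strip()
-- ===== Notes on version B (the rewrite author's own statement) =====
-- stated objective: alternative
-- what changed: A's single loop that accumulates, skips blanks after blanks and breaks on limits is replaced by a zip-with-predecessor comprehension that collapses blank runs, a separate scan that finds the character cut-off index, and a closed-form min/max computation of the number of lines to keep, applied as one slice.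
import Mathlib
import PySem

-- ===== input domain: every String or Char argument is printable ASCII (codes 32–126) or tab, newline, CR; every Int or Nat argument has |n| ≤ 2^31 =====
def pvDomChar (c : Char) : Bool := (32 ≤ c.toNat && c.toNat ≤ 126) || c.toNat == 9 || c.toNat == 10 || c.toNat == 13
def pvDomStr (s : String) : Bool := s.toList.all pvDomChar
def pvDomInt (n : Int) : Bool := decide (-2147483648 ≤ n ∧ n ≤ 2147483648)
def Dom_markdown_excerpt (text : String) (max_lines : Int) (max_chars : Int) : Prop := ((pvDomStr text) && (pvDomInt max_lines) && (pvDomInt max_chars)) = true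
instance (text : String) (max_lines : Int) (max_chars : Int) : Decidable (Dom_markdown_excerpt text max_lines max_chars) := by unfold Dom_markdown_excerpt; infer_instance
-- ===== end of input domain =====

-- B replaces A's single accumulate-skip-break loop by a zip-with-predecessor comprehension that
-- collapses blank runs, a scan for the character cut-off, and a closed-form min/max keep count
-- with one slice (objective: alternative decomposition, same cost).

-- ===== PORT A =====
-- the for-loop of A: 'continue' = recurse with unchanged state, 'break' = return selected
def pvALoop (max_lines max_chars : Int) : List String → List String → Int → List String
  | [], sel, _ => sel
  | raw :: rest, sel, size =>
    let line := PySem.Str.rstrip raw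
    if line == "" && !sel.isEmpty && PySem.List.pyGetD sel (-1) "" == "" then
      pvALoop max_lines max_chars rest sel size
    else
      let pieceLen := PySem.Str.len line + 1
      if !sel.isEmpty && (decide (PySem.List.len sel ≥ max_lines) || decide (size + pieceLen > max_chars)) then
        sel
      else
        pvALoop max_lines max_chars rest (sel ++ [line]) (size + pieceLen)

def markdown_excerpt (text : String) (max_lines : Int) (max_chars : Int) : String :=
  PySem.Str.strip (PySem.Str.join "\n" (pvALoop max_lines max_chars (PySem.Str.splitlines text) [] 0))

-- ===== PORT B =====
-- Source B's by_chars loop: first index at which the running size exceeds max_chars, else the default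
def pvBC (max_chars : Int) : List String → Int → Int → Int → Int
  | [], _, _, dflt => dflt
  | l :: rest, total, i, dflt =>
    let total' := total + PySem.Str.len l + 1
    if total' > max_chars then i else pvBC max_chars rest total' (i + 1) dflt

def markdown_excerpt_alt (text : String) (max_lines : Int) (max_chars : Int) : String :=
  let lines := (PySem.Str.splitlines text).map PySem.Str.rstrip
  let cleaned := (((none :: lines.map some).zip lines).filter
      (fun pl => pl.2 != "" || pl.1 != some "")).map (·.2)
  let by_chars := pvBC max_chars cleaned 0 0 (PySem.List.len cleaned)
  let keep := min (PySem.List.len cleaned) (max 1 (min max_lines by_chars))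
  PySem.Str.strip (PySem.Str.join "\n" (PySem.List.slice cleaned none (some keep)))

-- ===== PRECONDITION & SPEC =====
def Spec_markdown_excerpt (text : String) (max_lines : Int) (max_chars : Int) (out : String) : Prop := out = markdown_excerpt_alt text max_lines max_chars
instance (text : String) (max_lines : Int) (max_chars : Int) (out : String) : Decidable (Spec_markdown_excerpt text max_lines max_chars out) := by unfold Spec_markdown_excerpt; infer_instance

-- ===== CLAIM (what is proved, stated in full; the proofs are below) =====
def Claim_equal_markdown_excerpt : Prop := ∀ (text : String) (max_lines : Int) (max_chars : Int), Dom_markdown_excerpt text max_lines max_chars → Spec_markdown_excerpt text max_lines max_chars (markdown_excerpt text max_lines max_chars)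

-- ===== LEMMAS AND PROOFS =====

-- blank-run collapsing with a previous-line-was-blank flag (the common shape of A's skip and B's filter)
def pvClean : Bool → List String → List String
  | _, [] => []
  | pb, l :: r => if l == "" && pb then pvClean pb r else l :: pvClean (l == "") r

-- A's loop restricted to an already collapsed list (no skip branch)
def pvA2 (max_lines max_chars : Int) : List String → List String → Int → List String
  | [], sel, _ => sel
  | l :: rest, sel, size =>
    let pieceLen := PySem.Str.len l + 1
    if !sel.isEmpty && (decide (PySem.List.len sel ≥ max_lines) || decide (size + pieceLen > max_chars)) then
      sel
    else
      pvA2 max_lines max_chars rest (sel ++ [l]) (size + pieceLen)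

def pvSz (ls : List String) : Int := (ls.map (fun s => PySem.Str.len s + 1)).sum

theorem pv_len_nonneg (s : String) : 0 ≤ PySem.Str.len s := by
  simp [PySem.Str.len_eq]

theorem pv_sz_nonneg : ∀ (ls : List String), 0 ≤ pvSz ls
  | [] => by simp [pvSz]
  | l :: r => by
    have h1 := pv_len_nonneg l
    have h2 := pv_sz_nonneg r
    simp only [pvSz, List.map_cons, List.sum_cons] at *
    omega

theorem pv_aloop_eq_a2 (ml mc : Int) : ∀ (raws : List String) (sel : List String) (size : Int),
    pvALoop ml mc raws sel size
      = pvA2 ml mc (pvClean (!sel.isEmpty && PySem.List.pyGetD sel (-1) "" == "") (raws.map PySem.Str.rstrip)) sel size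
  | [], sel, size => by simp [pvALoop, pvClean, pvA2]
  | raw :: rest, sel, size => by
    rw [pvALoop]
    simp only [List.map_cons]
    by_cases hskip : (PySem.Str.rstrip raw == "" && (!sel.isEmpty && PySem.List.pyGetD sel (-1) "" == "")) = true
    · have h1 : (PySem.Str.rstrip raw == "" && !sel.isEmpty && PySem.List.pyGetD sel (-1) "" == "") = true := by
        simpa [Bool.and_assoc] using hskip
      rw [if_pos h1, pv_aloop_eq_a2 ml mc rest sel size]
      conv_rhs => rw [pvClean, if_pos hskip]
    · have h1 : ¬((PySem.Str.rstrip raw == "" && !sel.isEmpty && PySem.List.pyGetD sel (-1) "" == "") = true) := by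
        simpa [Bool.and_assoc] using hskip
      rw [if_neg h1]
      conv_rhs => rw [pvClean, if_neg hskip]
      rw [pvA2]
      by_cases hbrk : (!sel.isEmpty && (decide (PySem.List.len sel ≥ ml) || decide (size + (PySem.Str.len (PySem.Str.rstrip raw) + 1) > mc))) = true
      · rw [if_pos hbrk, if_pos hbrk]
      · rw [if_neg hbrk, if_neg hbrk]
        rw [pv_aloop_eq_a2 ml mc rest (sel ++ [PySem.Str.rstrip raw]) (size + (PySem.Str.len (PySem.Str.rstrip raw) + 1))]
        congr 1
        have : (sel ++ [PySem.Str.rstrip raw]).isEmpty = false := by simp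
        rw [this]
        simp

theorem pv_filter_eq_clean : ∀ (ls : List String) (p : Option String),
    ((((p :: ls.map some).zip ls).filter (fun pl => pl.2 != "" || pl.1 != some "")).map (·.2))
      = pvClean (p == some "") ls
  | [], p => by simp [pvClean]
  | l :: r, p => by
    have ih := pv_filter_eq_clean r (some l)
    simp only [List.map_cons, List.zip_cons_cons, List.filter_cons]
    by_cases hl : l = ""
    · by_cases hp : p = some ""
      · subst hl hp
        simpa [pvClean] using pv_filter_eq_clean r (some "")
      · subst hl
        simp only [pvClean]
        simp [hp, ih]
    · simp only [pvClean]
      simp [hl, ih]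

theorem pv_bc_lb (mc : Int) : ∀ (rest : List String) (t i d : Int), min i d ≤ pvBC mc rest t i d
  | [], t, i, d => by simp [pvBC]
  | l :: r, t, i, d => by
    rw [pvBC]
    split
    · omega
    · have := pv_bc_lb mc r (t + PySem.Str.len l + 1) (i + 1) d
      omega

theorem pv_bc_le (mc : Int) : ∀ (rest : List String) (t i d : Int) (j : Nat), j < rest.length →
    mc < t + pvSz (rest.take (j+1)) → pvBC mc rest t i d ≤ i + j
  | [], t, i, d, j, hj, _ => by simp at hj
  | l :: r, t, i, d, j, hj, hmc => by
    rw [pvBC]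
    split
    · omega
    · rename_i hle
      match j with
      | 0 =>
        exfalso
        simp only [List.take_succ_cons, List.take_zero, pvSz, List.map_cons, List.map_nil,
          List.sum_cons, List.sum_nil] at hmc
        omega
      | j' + 1 =>
        have := pv_bc_le mc r (t + PySem.Str.len l + 1) (i + 1) d j' (by simpa using hj) (by
          simp only [List.take_succ_cons, pvSz, List.map_cons, List.sum_cons] at hmc ⊢
          omega)
        omega

theorem pv_bc_ge (mc : Int) : ∀ (rest : List String) (t i : Int) (j : Nat), j < rest.length →
    t + pvSz (rest.take (j+1)) ≤ mc → i + j < pvBC mc rest t i (i + rest.length)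
  | [], t, i, j, hj, _ => by simp at hj
  | l :: r, t, i, j, hj, hmc => by
    rw [pvBC]
    have hlen : 0 ≤ PySem.Str.len l := pv_len_nonneg l
    have hc : ((l :: r).length : Int) = (r.length : Int) + 1 := by simp
    match j with
    | 0 =>
      simp only [List.take_succ_cons, List.take_zero, pvSz, List.map_cons, List.map_nil,
        List.sum_cons, List.sum_nil] at hmc
      rw [if_neg (by omega)]
      have := pv_bc_lb mc r (t + PySem.Str.len l + 1) (i + 1) (i + (l :: r).length)
      omega
    | j' + 1 =>
      simp only [List.take_succ_cons, pvSz, List.map_cons, List.sum_cons] at hmc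
      rw [if_neg (by have := pv_sz_nonneg (r.take (j'+1)); simp only [pvSz] at this; omega)]
      have ih := pv_bc_ge mc r (t + PySem.Str.len l + 1) (i + 1) j' (by simpa using hj) (by
        simp only [pvSz]; omega)
      have hcast : i + ((l :: r).length : Int) = (i + 1) + (r.length : Int) := by omega
      rw [hcast]
      push_cast
      omega

theorem pv_sz_append_singleton (a : List String) (x : String) :
    pvSz (a ++ [x]) = pvSz a + (PySem.Str.len x + 1) := by
  simp [pvSz]

theorem pv_take_succ_singleton (cs : List String) (j : Nat) (hj : j < cs.length) :
    cs.take (j+1) = cs.take j ++ [cs[j]] := by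
  rw [List.take_add_one, List.getElem?_eq_getElem hj]
  rfl

theorem pv_sz_take_succ (cs : List String) (j : Nat) (hj : j < cs.length) :
    pvSz (cs.take (j+1)) = pvSz (cs.take j) + (PySem.Str.len cs[j] + 1) := by
  rw [pv_take_succ_singleton cs j hj, pv_sz_append_singleton]

theorem pv_a2_take (ml mc : Int) (cs : List String)
    (keep : Int) (hkeep : keep = min (cs.length : Int) (max 1 (min ml (pvBC mc cs 0 0 (cs.length : Int))))) :
    ∀ (rest : List String) (j : Nat), rest = cs.drop j → j ≤ cs.length → (1 ≤ j → (j : Int) ≤ keep) →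
    pvA2 ml mc rest (cs.take j) (pvSz (cs.take j)) = cs.take keep.toNat
  | [], j, hr, hj, hk => by
    have hlen : cs.length ≤ j := by
      have := List.drop_eq_nil_iff.mp hr.symm
      omega
    have hk1 : keep ≤ (cs.length : Int) := hkeep ▸ min_le_left _ _
    rw [List.take_of_length_le hlen]
    rcases Nat.eq_zero_or_pos cs.length with h0 | hpos
    · rw [List.eq_nil_of_length_eq_zero h0]; simp [pvA2]
    · have hkj : (j : Int) ≤ keep := hk (by omega)
      have heq : keep = (cs.length : Int) := by omega
      rw [heq]
      simp [pvA2]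
  | l :: r, j, hr, hj, hk => by
    have hjlt : j < cs.length := by
      by_contra h
      rw [List.drop_eq_nil_iff.mpr (by omega)] at hr
      simp at hr
    rw [List.drop_eq_getElem_cons hjlt] at hr
    obtain ⟨hl, hrr⟩ : cs[j] = l ∧ cs.drop (j+1) = r := by
      constructor <;> [exact (List.cons.injEq _ _ _ _ ▸ hr.symm).1 ; exact (List.cons.injEq _ _ _ _ ▸ hr.symm).2]
    have hlennn := pv_len_nonneg l
    have hcs : cs ≠ [] := by intro h; subst h; simp at hjlt
    have hisemp : (cs.take j).isEmpty = decide (j = 0) := by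
      rcases Nat.eq_zero_or_pos j with h0 | hpos
      · subst h0; simp
      · have h1 : (cs.take j).isEmpty = false := by
          simp [List.take_eq_nil_iff, hcs]
          omega
        have h2 : decide (j = 0) = false := by simp; omega
        rw [h1, h2]
    have hlensel : PySem.List.len (cs.take j) = (j : Int) := by
      simp [PySem.List.len_eq, List.length_take, Nat.min_eq_left (by omega : j ≤ cs.length)]
    have hk1 : keep ≤ (cs.length : Int) := hkeep ▸ min_le_left _ _
    have hk2 : keep ≤ max 1 (min ml (pvBC mc cs 0 0 (cs.length : Int))) := hkeep ▸ min_le_right _ _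
    have hk3 : ∀ x : Int, x ≤ (cs.length : Int) → x ≤ max 1 (min ml (pvBC mc cs 0 0 (cs.length : Int))) → x ≤ keep :=
      fun x hx1 hx2 => hkeep ▸ le_min hx1 hx2
    rw [pvA2]
    simp only [hisemp, hlensel, ← hl]
    by_cases hbrk : (!(decide (j = 0)) && (decide ((j:Int) ≥ ml) || decide (pvSz (cs.take j) + (PySem.Str.len cs[j] + 1) > mc))) = true
    · rw [if_pos (by exact hbrk)]
      simp only [Bool.and_eq_true, Bool.not_eq_true', decide_eq_false_iff_not, Bool.or_eq_true,
        decide_eq_true_eq] at hbrk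
      obtain ⟨hj0, hcond⟩ := hbrk
      have hj1 : 1 ≤ j := Nat.pos_of_ne_zero hj0
      have hkj : (j : Int) ≤ keep := hk hj1
      have hup : max 1 (min ml (pvBC mc cs 0 0 (cs.length : Int))) ≤ (j : Int) := by
        apply max_le (by exact_mod_cast hj1)
        rcases hcond with hml | hsz
        · exact le_trans (min_le_left _ _) hml
        · have hble : pvBC mc cs 0 0 (cs.length : Int) ≤ 0 + j := by
            apply pv_bc_le mc cs 0 0 _ j hjlt
            rw [pv_sz_take_succ cs j hjlt]
            omega
          exact le_trans (min_le_right _ _) (by omega)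
      have hkeepj : keep = (j : Int) := le_antisymm (le_trans hk2 hup) hkj
      rw [hkeepj]
      simp
    · rw [if_neg (by exact hbrk)]
      simp only [Bool.and_eq_true, Bool.not_eq_true', decide_eq_false_iff_not, Bool.or_eq_true,
        decide_eq_true_eq, not_and, not_or, not_le, not_lt] at hbrk
      have hstep : cs.take j ++ [cs[j]] = cs.take (j+1) := (pv_take_succ_singleton cs j hjlt).symm
      have hsz := pv_sz_take_succ cs j hjlt
      rw [hstep, ← hsz]
      apply pv_a2_take ml mc cs keep hkeep r (j+1) hrr.symm (by omega)
      intro _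
      rcases Nat.eq_zero_or_pos j with h0 | hpos
      · have hlen1 : 1 ≤ (cs.length : Int) := by exact_mod_cast Nat.one_le_iff_ne_zero.mpr (by omega)
        have hge1 : (1:Int) ≤ keep := hk3 1 hlen1 (le_max_left _ _)
        push_cast
        omega
      · obtain ⟨hml2, hsz2⟩ := hbrk (by simpa using Nat.pos_iff_ne_zero.mp hpos)
        have hbge : (0:Int) + j < pvBC mc cs 0 0 (0 + (cs.length : Int)) := by
          apply pv_bc_ge mc cs 0 0 j hjlt
          rw [pv_sz_take_succ cs j hjlt]
          omega
        simp only [zero_add] at hbge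
        have hj1cast : ((j:Int) + 1) ≤ (cs.length : Int) := by exact_mod_cast hjlt
        have hfin : ((j:Int) + 1) ≤ keep := hk3 ((j:Int)+1) hj1cast
          (le_trans (le_min (by omega : ((j:Int)+1) ≤ ml) (by omega : ((j:Int)+1) ≤ pvBC mc cs 0 0 (cs.length : Int))) (le_max_right _ _))
        push_cast
        omega

-- ===== VERDICT (by name: the statement is the Claim_ definition above) =====
theorem markdown_excerpt_spec : Claim_equal_markdown_excerpt := by
  intro text ml mc _
  unfold Spec_markdown_excerpt markdown_excerpt markdown_excerpt_alt
  simp only [PySem.List.len_eq]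
  set lines := (PySem.Str.splitlines text).map PySem.Str.rstrip with hlines
  set cs := pvClean false lines with hcs
  have hclean' : (((none :: lines.map some).zip lines).filter (fun pl => pl.2 != "" || pl.1 != some "")).map (·.2) = cs := by
    simpa using pv_filter_eq_clean lines none
  rw [hclean']
  have hA := pv_aloop_eq_a2 ml mc (PySem.Str.splitlines text) [] 0
  simp only [List.isEmpty_nil, Bool.not_true, Bool.false_and, ← hlines, ← hcs] at hA
  rw [hA]
  have hkeepnn : 0 ≤ min ((cs.length : Int)) (max 1 (min ml (pvBC mc cs 0 0 (cs.length : Int)))) :=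
    le_min (Int.natCast_nonneg _) (le_trans zero_le_one (le_max_left _ _))
  rw [PySem.List.slice_to cs hkeepnn]
  have h := pv_a2_take ml mc cs _ rfl cs 0 rfl (by omega) (by omega)
  simp only [List.take_zero, pvSz, List.map_nil, List.sum_nil] at h
  rw [h]
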